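-- pv_equiv track=rewrite | github.com/hoanbka/advanced-algorithms | reversedSumOfDigits.py | reversedSumOfDigits
-- ===== SOURCE A (Python) =====
-- def reversedSumOfDigits(p, n):
--     if n == 1:
--         return str(p) if p <= 9 else "-1"
--     start = int("1" + "0"* (n-1))
--
--     arr = list(str(start))
--     index = len(arr) - 1
--     flag = False
--     curr = sumOfDigit(arr)
--     if curr == p and len(arr) == n:
--         return ''.join(arr)
--
--     curr = 0
--     while curr < p and index >= 0:
--         if p - curr >= 10:
--             arr[index] = '9'
--             curr += 9
--         else:
--             tmp = str(p - curr)
--             if index != 0: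
--                 tmp = str(p - curr - int(arr[0]))
--             arr[index] = tmp
--             flag = True
--             break
--         index -= 1
--
--     if flag == True:
--         return ''.join(arr)
--     return "-1"
--
-- def sumOfDigit(arr):
--     ans = 0
--     for e in arr:
--         ans += int(e)
--     return ans
-- ===== SOURCE B (Python) =====
-- def reversedSumOfDigits(p, n):
--     if n == 1:
--         return str(p) if p <= 9 else "-1"
--     if p < 1 or 9 * n < p:
--         return "-1"
--     d0 = max(1, p - 9 * (n - 1))
--     r = p - d0
--     nines, mid = divmod(r, 9)
--     return (str(d0)
--             + "0" * (n - 1 - nines - (1 if mid else 0))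
--             + (str(mid) if mid else "")
--             + "9" * nines)
-- ===== Notes on version B (the rewrite author's own statement) =====
-- stated objective: simpler
-- what changed: Replaces A's build-'10...0'-string-then-fill-nines-right-to-left while loop with a closed-form construction: leading digit max(1, p-9*(n-1)), then zeros, one middle digit r%9 and r//9 trailing nines.
-- intended difference: For n <= 0 with 1 <= p <= 9, A's leftover loop state returns str(p) although no n-digit number exists; B returns '-1', the intended 'impossible' answer. — e.g. on reversedSumOfDigits(5, 0): A returns "5", B returns "-1"
import Mathlib
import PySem

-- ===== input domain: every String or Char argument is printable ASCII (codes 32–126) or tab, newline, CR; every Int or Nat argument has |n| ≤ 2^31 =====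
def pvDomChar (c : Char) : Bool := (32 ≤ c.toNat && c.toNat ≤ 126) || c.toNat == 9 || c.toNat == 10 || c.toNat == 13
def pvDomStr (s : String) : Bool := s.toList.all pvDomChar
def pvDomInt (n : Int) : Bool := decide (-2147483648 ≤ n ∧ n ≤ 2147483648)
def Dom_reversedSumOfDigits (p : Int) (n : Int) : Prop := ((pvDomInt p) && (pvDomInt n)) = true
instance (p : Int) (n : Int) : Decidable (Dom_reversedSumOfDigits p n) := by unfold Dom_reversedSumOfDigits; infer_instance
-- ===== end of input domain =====

-- B replaces A's build-"10…0"-then-fill-nines-right-to-left loop by the closed-form smallest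
-- n-digit number with digit sum p (leading digit, zeros, one middle digit, trailing nines): simpler.

-- ===== PORT A =====

-- int("1" + "0"*(n-1)): the argument is always the canonical decimal literal "1" followed by
-- zeros (no sign/space/underscore), so int() here is exactly the left-to-right digit fold.
def pvParseDecimal (cs : List Char) : Int :=
  cs.foldl (fun a c => 10 * a + ((c.toNat : Int) - 48)) 0

-- sumOfDigit: int(e) on the single-digit strings of arr never raises, hence the .getD 0
def pvSumOfDigit (arr : List String) : Int :=
  arr.foldl (fun ans e => ans + (PySem.Int.ofStr? e).getD 0) 0

-- the while loop; fuel is the list length (the loop runs at most index+1 ≤ len(arr) times)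
def pvLoopA (p : Int) : Nat → List String → Int → Int → List String × Bool
  | 0, arr, _, _ => (arr, false)
  | fuel + 1, arr, index, curr =>
    if curr < p ∧ 0 ≤ index then
      if 10 ≤ p - curr then
        pvLoopA p fuel (arr.set index.toNat "9") (index - 1) (curr + 9)
      else
        let tmp := PySem.Int.toStr (p - curr)
        let tmp := if index ≠ 0 then
            PySem.Int.toStr (p - curr - (PySem.Int.ofStr? ((PySem.List.pyGet? arr 0).getD "")).getD 0)
          else tmp
        (arr.set index.toNat tmp, true)
    else (arr, false)

def reversedSumOfDigits (p : Int) (n : Int) : String :=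
  if n = 1 then (if p ≤ 9 then PySem.Int.toStr p else "-1")
  else
    let start : Int := pvParseDecimal ('1' :: List.replicate (n - 1).toNat '0')
    let arr : List String := (PySem.Int.toStr start).toList.map (fun c => String.ofList [c])
    let index : Int := (arr.length : Int) - 1
    let curr : Int := pvSumOfDigit arr
    if curr = p ∧ (arr.length : Int) = n then PySem.Str.join "" arr
    else
      let res := pvLoopA p arr.length arr index 0
      if res.2 then PySem.Str.join "" res.1 else "-1"

-- ===== PORT B =====
def reversedSumOfDigits_alt (p : Int) (n : Int) : String :=
  if n = 1 then (if p ≤ 9 then PySem.Int.toStr p else "-1")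
  else if p < 1 ∨ 9 * n < p then "-1"
  else
    let d0 : Int := max 1 (p - 9 * (n - 1))
    let r : Int := p - d0
    let nines : Int := PySem.Int.floordiv r 9
    let mid : Int := PySem.Int.mod r 9
    PySem.Int.toStr d0
      ++ String.ofList (List.replicate (n - 1 - nines - (if mid ≠ 0 then 1 else 0)).toNat '0')
      ++ (if mid ≠ 0 then PySem.Int.toStr mid else "")
      ++ String.ofList (List.replicate nines.toNat '9')

-- ===== PRECONDITION & SPEC =====
-- For n ≤ 0 with 1 ≤ p ≤ 9, A's leftover loop state returns str(p) although no n-digit number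
-- exists; B returns "-1", the intended 'impossible' answer.
def D_reversedSumOfDigits (p : Int) (n : Int) : Prop := n ≤ 0 ∧ 1 ≤ p ∧ p ≤ 9
instance (p : Int) (n : Int) : Decidable (D_reversedSumOfDigits p n) := by
  unfold D_reversedSumOfDigits; infer_instance

def Spec_reversedSumOfDigits (p : Int) (n : Int) (out : String) : Prop :=
  ¬ D_reversedSumOfDigits p n → out = reversedSumOfDigits_alt p n
instance (p : Int) (n : Int) (out : String) : Decidable (Spec_reversedSumOfDigits p n out) := by
  unfold Spec_reversedSumOfDigits; infer_instance

def pvDiffWitness_reversedSumOfDigits : Int × Int := (5, 0)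
def pvDiffWitnessOut_reversedSumOfDigits : String × String := ("5", "-1")

-- ===== CLAIM (what is proved, stated in full; the proofs are below) =====
def Claim_unchanged_reversedSumOfDigits : Prop := ∀ (p : Int) (n : Int), Dom_reversedSumOfDigits p n → Spec_reversedSumOfDigits p n (reversedSumOfDigits p n)
def Claim_changed_reversedSumOfDigits : Prop := Dom_reversedSumOfDigits (pvDiffWitness_reversedSumOfDigits.1) (pvDiffWitness_reversedSumOfDigits.2) ∧ D_reversedSumOfDigits (pvDiffWitness_reversedSumOfDigits.1) (pvDiffWitness_reversedSumOfDigits.2) ∧ reversedSumOfDigits (pvDiffWitness_reversedSumOfDigits.1) (pvDiffWitness_reversedSumOfDigits.2) = pvDiffWitnessOut_reversedSumOfDigits.1 ∧ reversedSumOfDigits_alt (pvDiffWitness_reversedSumOfDigits.1) (pvDiffWitness_reversedSumOfDigits.2) = pvDiffWitnessOut_reversedSumOfDigits.2 ∧ pvDiffWitnessOut_reversedSumOfDigits.1 ≠ pvDiffWitnessOut_reversedSumOfDigits.2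
def Claim_exact_reversedSumOfDigits : Prop := ∀ (p : Int) (n : Int), Dom_reversedSumOfDigits p n → D_reversedSumOfDigits p n → reversedSumOfDigits p n ≠ reversedSumOfDigits_alt p n

-- ===== LEMMAS AND PROOFS =====

theorem pv_foldl_parse_zeros (k : ℕ) : ∀ (a : Int),
    List.foldl (fun a c => 10 * a + ((c.toNat : Int) - 48)) a (List.replicate k '0') = a * 10 ^ k := by
  induction k with
  | zero => simp
  | succ k ih =>
    intro a
    rw [List.replicate_succ, List.foldl_cons, ih]
    have h0 : ((('0'.toNat : Int)) - 48) = 0 := by decide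
    rw [h0]
    ring

theorem pv_parse_one_zeros (k : ℕ) : pvParseDecimal ('1' :: List.replicate k '0') = 10 ^ k := by
  unfold pvParseDecimal
  rw [List.foldl_cons, pv_foldl_parse_zeros]
  norm_num
  decide

theorem pv_toDigitsCore_pow10 (m : ℕ) : ∀ (fuel : ℕ) (acc : List Char), m < fuel →
    Nat.toDigitsCore 10 fuel (10 ^ m) acc = '1' :: (List.replicate m '0' ++ acc) := by
  induction m with
  | zero =>
    intro fuel acc h
    obtain ⟨f, rfl⟩ : ∃ f, fuel = f + 1 := ⟨fuel - 1, by omega⟩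
    rw [Nat.toDigitsCore.eq_def]
    norm_num
    decide
  | succ m ih =>
    intro fuel acc h
    obtain ⟨f, rfl⟩ : ∃ f, fuel = f + 1 := ⟨fuel - 1, by omega⟩
    rw [Nat.toDigitsCore.eq_def]
    have h1 : 10 ^ (m + 1) % 10 = 0 := by rw [pow_succ]; exact Nat.mul_mod_left _ _
    have h2 : 10 ^ (m + 1) / 10 = 10 ^ m := by rw [pow_succ]; exact Nat.mul_div_cancel _ (by norm_num)
    simp only [h1, h2]
    rw [if_neg (by positivity)]
    rw [ih f (Nat.digitChar 0 :: acc) (by omega)]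
    have : Nat.digitChar 0 = '0' := by decide
    rw [this, List.replicate_succ', List.append_assoc]
    simp

theorem pv_toStr_pow10 (m : ℕ) :
    (PySem.Int.toStr ((10 : Int) ^ m)).toList = '1' :: List.replicate m '0' := by
  have hnn : ¬((10 : Int) ^ m < 0) := by simp [pow_nonneg]
  have htn : ((10 : Int) ^ m).toNat = 10 ^ m := by
    rw [show ((10 : Int) ^ m) = ((10 ^ m : ℕ) : Int) by push_cast; ring]
    exact Int.toNat_natCast _
  unfold PySem.Int.toStr PySem.Int.toChars
  rw [if_neg hnn, String.toList_ofList, htn]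
  unfold Nat.toDigits
  rw [pv_toDigitsCore_pow10 m _ _ (by have := Nat.lt_pow_self (a := 10) (n := m) (by norm_num); omega)]
  simp

theorem pv_foldl_sum_zeros (k : ℕ) : ∀ (a : Int),
    List.foldl (fun ans e => ans + (PySem.Int.ofStr? e).getD 0) a (List.replicate k "0") = a := by
  induction k with
  | zero => simp
  | succ k ih =>
    intro a
    rw [List.replicate_succ, List.foldl_cons, ih]
    have : (PySem.Int.ofStr? "0").getD 0 = 0 := by decide
    rw [this]; ring

theorem pv_sum_arr (k : ℕ) : pvSumOfDigit ("1" :: List.replicate k "0") = 1 := by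
  unfold pvSumOfDigit
  rw [List.foldl_cons, pv_foldl_sum_zeros]
  decide

def pvMk (j k : ℕ) : List String := "1" :: (List.replicate j "0" ++ List.replicate k "9")

theorem pv_set_last_replicate {α : Type} (m : ℕ) (a b : α) :
    (List.replicate (m + 1) a).set m b = List.replicate m a ++ [b] := by
  rw [List.replicate_succ', List.set_append]
  simp

theorem pv_loop_exit (p : Int) (j k : ℕ) (h : p ≤ 9 * k) :
    pvLoopA p (j + 1) (pvMk j k) (j : Int) (9 * k) = (pvMk j k, false) := by
  rw [pvLoopA]
  rw [if_neg (by push_cast; omega)]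

theorem pv_loop_break_small (p : Int) (j k : ℕ) (h1 : 9 * k < p) (h2 : p - 9 * k ≤ 9) :
    pvLoopA p (j + 1) (pvMk j k) (j : Int) (9 * k) =
      (if j = 0 then PySem.Int.toStr (p - 9 * k) :: List.replicate k "9"
       else "1" :: (List.replicate (j - 1) "0" ++ PySem.Int.toStr (p - 9 * k - 1) :: List.replicate k "9"), true) := by
  rw [pvLoopA]
  rw [if_pos (by constructor <;> [push_cast; skip] <;> omega)]
  rw [if_neg (by push_cast; omega)]
  have hget : (PySem.List.pyGet? (pvMk j k) 0).getD "" = "1" := by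
    have hc : (0:Int) ≤ ↑j + ↑k := by positivity
    simp [pvMk, PySem.List.pyGet?, PySem.List.pyIdx?, hc]
  have hofs : (PySem.Int.ofStr? "1").getD 0 = 1 := by decide
  cases j with
  | zero =>
    simp only [pvMk]
    norm_num
  | succ m =>
    simp only [hget, hofs]
    rw [if_pos (by push_cast; omega)]
    simp only [pvMk, Int.toNat_natCast]
    rw [List.set_cons_succ]
    rw [List.set_append]
    rw [if_pos (by simp)]
    rw [pv_set_last_replicate]
    simp

theorem pv_loop_nines (p : Int) (j : ℕ) : ∀ (k : ℕ), 10 ≤ p - 9 * k →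
    pvLoopA p (j + 1) (pvMk j k) (j : Int) (9 * k) =
      (if 10 + 9 * (j : Int) ≤ p - 9 * k then (List.replicate (j + k + 1) "9", false)
      else if ((p - 9 * (k : Int) - 10) / 9 + 1).toNat = j then
        (PySem.Int.toStr (p - 9 * ((k : Int) + (j : Int))) :: List.replicate (k + j) "9", true)
      else
        ("1" :: (List.replicate (j - ((p - 9 * (k : Int) - 10) / 9 + 1).toNat - 1) "0" ++
          PySem.Int.toStr (p - 9 * ((k : Int) + (((p - 9 * (k : Int) - 10) / 9 + 1).toNat : Int)) - 1) ::
          List.replicate (k + ((p - 9 * (k : Int) - 10) / 9 + 1).toNat) "9"), true)) := by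
  induction j with
  | zero =>
    intro k h1
    rw [pvLoopA, if_pos ⟨by omega, by norm_num⟩, if_pos (by omega), pvLoopA]
    rw [if_pos (by push_cast; omega)]
    simp [pvMk, List.replicate_succ]
  | succ m ih =>
    intro k h1
    rw [pvLoopA, if_pos ⟨by omega, by positivity⟩, if_pos (by omega)]
    have hset : (pvMk (m+1) k).set (((m+1 : ℕ) : Int)).toNat "9" = pvMk m (k+1) := by
      simp only [pvMk, Int.toNat_natCast]
      rw [List.set_cons_succ, List.set_append, if_pos (by simp), pv_set_last_replicate]
      simp [List.replicate_succ]
    rw [hset]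
    have hidx : ((m+1 : ℕ) : Int) - 1 = (m : Int) := by push_cast; omega
    have hcurr : 9 * ((k : ℕ) : Int) + 9 = 9 * ((k+1 : ℕ) : Int) := by push_cast; ring
    rw [hidx, hcurr]
    by_cases h2 : 10 ≤ p - 9 * ((k+1 : ℕ) : Int)
    · rw [ih (k+1) h2]
      push_cast
      set t' : ℕ := ((p - 9 * ((k:Int) + 1) - 10) / 9 + 1).toNat with ht'
      have hT : ((p - 9 * (k:Int) - 10) / 9 + 1).toNat = t' + 1 := by rw [ht']; omega
      rw [hT]
      rw [show (m + (k+1) + 1) = (m + 1 + k + 1) by omega]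
      rw [show (p - 9*((k:Int) + 1 + (m:Int))) = (p - 9*((k:Int) + ((m:Int) + 1))) by ring]
      rw [show (k + 1 + m) = (k + (m + 1)) by omega]
      rw [show (m - t' - 1) = (m + 1 - (t'+1) - 1) by omega]
      rw [show (p - 9*((k:Int) + 1 + (t':Int)) - 1) = (p - 9*((k:Int) + ((t'+1 : ℕ):Int)) - 1) by push_cast; ring]
      rw [show (k + 1 + t') = (k + (t'+1)) by omega]
      simp only [show (10 + 9*(m:Int) ≤ p - 9*((k:Int)+1)) ↔ (10 + 9*((m:Int)+1) ≤ p - 9*(k:Int)) from by omega,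
        show (t' = m) ↔ (t'+1 = m+1) from by omega]
    · rw [pv_loop_break_small p m (k+1) (by push_cast at h1 ⊢; omega) (by push_cast at h1 h2 ⊢; omega)]
      push_cast
      have ht1 : ((p - 9*(k:Int) - 10)/9 + 1).toNat = 1 := by omega
      have hcond : ¬(10 + 9*((m:Int)+1) ≤ p - 9*(k:Int)) := by omega
      rw [if_neg hcond, ht1]
      by_cases hm : m = 0
      · subst hm
        rw [if_pos rfl, if_pos (by norm_num)]
        norm_num
      · rw [if_neg hm, if_neg (by omega)]
        rw [show (m + 1 - 1 - 1) = m - 1 by omega]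
        norm_num

theorem pv_join_empty (ls : List (List Char)) : PySem.Chars.join [] ls = ls.flatten := by
  induction ls with
  | nil => simp [PySem.Chars.join_nil]
  | cons p rest ih =>
    cases rest with
    | nil => simp [PySem.Chars.join_singleton]
    | cons q r => rw [PySem.Chars.join_cons_cons]; simp [ih]

theorem pv_flatten_replicate (k : ℕ) (c : Char) : (List.replicate k [c]).flatten = List.replicate k c := by
  induction k with
  | zero => simp
  | succ k ih => simp [List.replicate_succ, ih]

-- ===== VERDICT (by name: the statement is the Claim_ definition above) =====
theorem pv_A_small (p n : Int) (h1 : n ≠ 1) (h0 : n ≤ 0) (hnd : p ≤ 0 ∨ 10 ≤ p) :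
    reversedSumOfDigits p n = "-1" := by
  simp only [reversedSumOfDigits]
  rw [if_neg h1]
  have hz : (n - 1).toNat = 0 := by omega
  rw [hz]
  have e1 : pvParseDecimal ('1' :: List.replicate 0 '0') = 1 := by decide
  rw [e1]
  have e2 : (PySem.Int.toStr 1).toList.map (fun c => String.ofList [c]) = ["1"] := by decide
  rw [e2]
  have e3 : pvSumOfDigit ["1"] = 1 := by decide
  rw [e3]
  rw [if_neg (by simp; intro h; omega)]
  rcases hnd with hp | hp
  · rw [show pvLoopA p (List.length ["1"]) ["1"] ((List.length ["1"] : Int) - 1) 0 = (["1"], false) by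
      rw [show List.length ["1"] = 0 + 1 from rfl, pvLoopA]
      rw [if_neg (by omega)]]
    rfl
  · rw [show pvLoopA p (List.length ["1"]) ["1"] ((List.length ["1"] : Int) - 1) 0 = (["9"], false) by
      rw [show List.length ["1"] = 0 + 1 from rfl, pvLoopA]
      rw [if_pos (by omega), if_pos (show (10:Int) ≤ p - 0 by omega), pvLoopA]
      norm_num]
    rfl

theorem reversedSumOfDigits_spec : Claim_unchanged_reversedSumOfDigits := by
  intro p n _ hnd
  show reversedSumOfDigits p n = reversedSumOfDigits_alt p n
  by_cases h1 : n = 1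
  · simp [reversedSumOfDigits, reversedSumOfDigits_alt, h1]
  by_cases h0 : n ≤ 0
  · have hp : p ≤ 0 ∨ 10 ≤ p := by
      by_contra hc
      exact hnd ⟨h0, by omega, by omega⟩
    rw [pv_A_small p n h1 h0 hp]
    unfold reversedSumOfDigits_alt
    rw [if_neg h1, if_pos (by omega)]
  · have hn2 : 2 ≤ n := by omega
    simp only [reversedSumOfDigits, reversedSumOfDigits_alt]
    rw [if_neg h1, if_neg h1]
    set z : ℕ := (n - 1).toNat with hzdef
    have hz1 : 1 ≤ z := by omega
    have hzn : (z : Int) = n - 1 := by omega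
    rw [pv_parse_one_zeros, pv_toStr_pow10]
    have harr : List.map (fun c => String.ofList [c]) ('1' :: List.replicate z '0')
        = "1" :: List.replicate z "0" := by
      simp only [List.map_cons, List.map_replicate]
    rw [harr]
    have hlen : (("1" :: List.replicate z "0") : List String).length = z + 1 := by simp
    rw [hlen, pv_sum_arr]
    by_cases hp1 : p = 1
    · rw [if_pos ⟨by omega, by omega⟩, if_neg (show ¬(p < 1 ∨ 9*n < p) by push_neg; exact ⟨by omega, by omega⟩)]
      rw [show max 1 (p - 9*(n-1)) = 1 by omega]
      rw [show p - 1 = 0 by omega]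
      rw [show PySem.Int.floordiv 0 9 = 0 from by decide]
      rw [show PySem.Int.mod 0 9 = 0 from by decide]
      rw [if_neg (show ¬((0:Int) ≠ 0) by simp), if_neg (show ¬((0:Int) ≠ 0) by simp)]
      rw [show (n - 1 - 0 - 0).toNat = z by omega]
      rw [← String.toList_inj]
      simp only [PySem.Str.toList_join, String.toList_append, String.toList_ofList,
        List.map_cons, List.map_replicate,
        show ("" : String).toList = ([] : List Char) from rfl]
      rw [pv_join_empty]
      simp only [List.flatten_cons, pv_flatten_replicate, Int.toNat_zero, List.replicate_zero,
        List.append_nil,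
        show ("1" : String).toList = ['1'] from by decide,
        show ("0" : String).toList = ['0'] from by decide,
        show (PySem.Int.toStr 1).toList = ['1'] from by decide]
    · rw [if_neg (fun h => hp1 h.1.symm)]
      have hidx : ((z+1 : ℕ) : Int) - 1 = (z : Int) := by omega
      rw [hidx]
      have hmk : ("1" :: List.replicate z "0") = pvMk z 0 := by simp [pvMk]
      rw [hmk]
      have hexit := pv_loop_exit p z 0
      have hbreak := pv_loop_break_small p z 0
      have hnines := pv_loop_nines p z 0
      simp only [Nat.cast_zero, mul_zero, sub_zero, zero_add, add_zero, Nat.zero_add,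
        Nat.add_zero, List.replicate_zero, List.append_nil] at hexit hbreak hnines
      by_cases hple : p ≤ 0
      · rw [hexit (by omega)]
        rw [if_pos (Or.inl (by omega))]
        simp
      · by_cases hps : p ≤ 9
        · -- 2 ≤ p ≤ 9
          rw [hbreak (by omega) (by omega)]
          rw [if_neg (by omega : ¬ z = 0)]
          rw [if_neg (show ¬(p < 1 ∨ 9*n < p) by push_neg; exact ⟨by omega, by omega⟩)]
          rw [if_pos rfl]
          rw [show max 1 (p - 9*(n-1)) = 1 by omega]
          rw [show PySem.Int.floordiv (p - 1) 9 = 0 from by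
            rw [PySem.Int.floordiv_eq_ediv_of_pos (by norm_num)]; omega]
          rw [show PySem.Int.mod (p - 1) 9 = p - 1 from by
            rw [PySem.Int.mod_eq_emod_of_pos (by norm_num)]; omega]
          rw [if_pos (show p - 1 ≠ 0 by omega), if_pos (show p - 1 ≠ 0 by omega)]
          rw [show (n - 1 - 0 - 1).toNat = z - 1 by omega]
          rw [← String.toList_inj]
          simp only [PySem.Str.toList_join, pv_join_empty, String.toList_append, String.toList_ofList,
            List.map_cons, List.map_append, List.map_replicate, pv_flatten_replicate,
            List.flatten_cons, List.flatten_append, Int.toNat_zero, List.replicate_zero,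
            List.flatten_nil, List.append_nil,
            show ("1" : String).toList = ['1'] from by decide,
            show ("0" : String).toList = ['0'] from by decide,
            show (PySem.Int.toStr 1).toList = ['1'] from by decide]
          rw [show ("" : String).toList = ([] : List Char) from rfl, pv_join_empty]
          simp
        · -- 10 ≤ p
          rw [hnines (by omega)]
          by_cases hbig : 10 + 9 * (z : Int) ≤ p
          · rw [if_pos hbig]
            rw [if_pos (Or.inr (by omega))]
            simp
          · rw [if_neg hbig]
            by_cases ht : ((p - 10) / 9 + 1).toNat = z
            · rw [if_pos ht]
              rw [if_neg (show ¬(p < 1 ∨ 9*n < p) by push_neg; exact ⟨by omega, by omega⟩)]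
              rw [if_pos rfl]
              rw [show max 1 (p - 9*(n-1)) = p - 9*(n-1) by omega]
              rw [show p - (p - 9*(n-1)) = 9*(n-1) by ring]
              rw [show PySem.Int.floordiv (9*(n-1)) 9 = n - 1 from by
                rw [PySem.Int.floordiv_eq_ediv_of_pos (by norm_num)]; omega]
              rw [show PySem.Int.mod (9*(n-1)) 9 = 0 from by
                rw [PySem.Int.mod_eq_emod_of_pos (by norm_num)]; omega]
              rw [if_neg (show ¬((0:Int) ≠ 0) by simp), if_neg (show ¬((0:Int) ≠ 0) by simp)]
              rw [show (n - 1 - (n - 1) - 0).toNat = 0 by omega]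
              rw [show (n - 1).toNat = z by omega]
              rw [hzn]
              rw [← String.toList_inj]
              simp only [PySem.Str.toList_join, pv_join_empty, String.toList_append,
                String.toList_ofList, List.map_cons, List.map_append, List.map_replicate,
                pv_flatten_replicate, List.flatten_cons, List.flatten_append, List.replicate_zero,
                List.flatten_nil, List.append_nil, List.nil_append,
                show ("9" : String).toList = ['9'] from by decide]
              rw [show ("" : String).toList = ([] : List Char) from rfl, pv_join_empty]
              simp
            · rw [if_neg ht]
              rw [if_neg (show ¬(p < 1 ∨ 9*n < p) by push_neg; exact ⟨by omega, by omega⟩)]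
              rw [if_pos rfl]
              rw [show max 1 (p - 9*(n-1)) = 1 by omega]
              rw [show PySem.Int.floordiv (p - 1) 9 = ((((p - 10) / 9 + 1).toNat : ℕ) : Int) from by
                rw [PySem.Int.floordiv_eq_ediv_of_pos (by norm_num)]; omega]
              rw [show PySem.Int.mod (p - 1) 9 = (p - 1) % 9 from
                PySem.Int.mod_eq_emod_of_pos (by norm_num)]
              rw [Int.toNat_natCast]
              by_cases hm : (p - 1) % 9 = 0
              · rw [if_neg (by simp [hm]), if_neg (by simp [hm])]
                rw [show (n - 1 - ((((p - 10) / 9 + 1).toNat : ℕ) : Int) - 0).toNat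
                    = z - ((p - 10) / 9 + 1).toNat by omega]
                rw [show p - 9 * ((((p - 10) / 9 + 1).toNat : ℕ) : Int) - 1 = 0 by omega]
                rw [← String.toList_inj]
                simp only [PySem.Str.toList_join, pv_join_empty, String.toList_append,
                  String.toList_ofList, List.map_cons, List.map_append, List.map_replicate,
                  pv_flatten_replicate, List.flatten_cons, List.flatten_append, List.append_nil,
                  show ("1" : String).toList = ['1'] from by decide,
                  show ("0" : String).toList = ['0'] from by decide,
                  show ("9" : String).toList = ['9'] from by decide,
                  show (PySem.Int.toStr 1).toList = ['1'] from by decide,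
                  show (PySem.Int.toStr 0).toList = ['0'] from by decide]
                rw [show z - ((p - 10) / 9 + 1).toNat
                    = (z - ((p - 10) / 9 + 1).toNat - 1) + 1 by omega, List.replicate_succ']
                rw [show ("" : String).toList = ([] : List Char) from rfl, pv_join_empty]
                simp
              · rw [if_pos hm, if_pos hm]
                rw [show (n - 1 - ((((p - 10) / 9 + 1).toNat : ℕ) : Int) - 1).toNat
                    = z - ((p - 10) / 9 + 1).toNat - 1 by omega]
                rw [show (p - 1) % 9 = p - 9 * ((((p - 10) / 9 + 1).toNat : ℕ) : Int) - 1 by omega]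
                rw [← String.toList_inj]
                simp only [PySem.Str.toList_join, pv_join_empty, String.toList_append,
                  String.toList_ofList, List.map_cons, List.map_append, List.map_replicate,
                  pv_flatten_replicate, List.flatten_cons, List.flatten_append, List.append_nil,
                  show ("1" : String).toList = ['1'] from by decide,
                  show ("0" : String).toList = ['0'] from by decide,
                  show ("9" : String).toList = ['9'] from by decide,
                  show (PySem.Int.toStr 1).toList = ['1'] from by decide]
                rw [show ("" : String).toList = ([] : List Char) from rfl, pv_join_empty]
                simp

theorem reversedSumOfDigits_changed : Claim_changed_reversedSumOfDigits := by
  unfold Claim_changed_reversedSumOfDigits; decide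

theorem reversedSumOfDigits_tight : Claim_exact_reversedSumOfDigits := by
  intro p n _ hD
  obtain ⟨hn0, hp1, hp9⟩ := hD
  have h1 : n ≠ 1 := by omega
  have hA : reversedSumOfDigits p n = PySem.Int.toStr p := by
    simp only [reversedSumOfDigits]
    rw [if_neg h1]
    have hz : (n - 1).toNat = 0 := by omega
    rw [hz]
    rw [show pvParseDecimal ('1' :: List.replicate 0 '0') = 1 from by decide]
    rw [show List.map (fun c => String.ofList [c]) (PySem.Int.toStr 1).toList = ["1"] from by decide]
    rw [show pvSumOfDigit ["1"] = 1 from by decide]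
    rw [if_neg (by simp; intro h; omega)]
    rw [show pvLoopA p (List.length ["1"]) ["1"] ((List.length ["1"] : Int) - 1) 0 = ([PySem.Int.toStr p], true) by
      rw [show List.length ["1"] = 0 + 1 from rfl, pvLoopA]
      rw [if_pos (by omega), if_neg (show ¬(10:Int) ≤ p - 0 by omega)]
      norm_num]
    rw [← String.toList_inj]
    simp [PySem.Str.toList_join, PySem.Chars.join_singleton]
  have hB : reversedSumOfDigits_alt p n = "-1" := by
    simp only [reversedSumOfDigits_alt]
    rw [if_neg h1, if_pos (by omega)]
  rw [hA, hB]
  interval_cases p <;> decide
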